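-- pv_equiv track=rewrite | github.com/Sazid99246/gfg-nation-skillup | DSA/Week 1/count_numbers_divisible_by_primes.py | countDivisible
-- ===== SOURCE A (Python) =====
-- def countDivisible(arr, m):
--     count = 0
--     for i in range(1, m + 1):
--         for n in range(len(arr)):
--             if i % arr[n] == 0:
--                 count += 1
--                 break
--     return count
-- ===== SOURCE B (Python) =====
-- def countDivisible(arr, m):
--     marked = set()
--     for a in arr:
--         d = abs(a)
--         if d:
--             marked.update(range(d, m + 1, d))
--     return len(marked)
-- ===== Notes on version B (the rewrite author's own statement) =====
-- stated objective: faster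
-- what changed: Instead of testing every i in 1..m against every array element, B marks the multiples of each nonzero |element| up to m in a set and returns its size, so non-multiples are never touched.
import Mathlib
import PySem

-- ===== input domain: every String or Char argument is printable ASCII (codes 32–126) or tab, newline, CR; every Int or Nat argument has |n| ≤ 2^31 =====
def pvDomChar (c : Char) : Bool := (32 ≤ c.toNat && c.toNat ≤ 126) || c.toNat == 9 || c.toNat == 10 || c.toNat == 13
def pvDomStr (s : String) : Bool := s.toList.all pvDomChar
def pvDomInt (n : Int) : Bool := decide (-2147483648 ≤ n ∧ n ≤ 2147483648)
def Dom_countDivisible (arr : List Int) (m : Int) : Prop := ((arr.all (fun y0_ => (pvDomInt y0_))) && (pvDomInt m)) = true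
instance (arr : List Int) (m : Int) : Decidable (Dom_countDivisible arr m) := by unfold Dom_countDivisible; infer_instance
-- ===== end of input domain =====

-- B marks the multiples of each nonzero |array element| in a set instead of testing every i
-- in 1..m against every array element (per-divisor marking instead of per-number trial division).

-- ===== PORT A =====
-- inner loop 'for n in range(len(arr)): if i % arr[n] == 0: count += 1; break'
-- as structural recursion over arr (same first-match/break semantics)
def countDivisibleInner (i : Int) : List Int → Int
  | [] => 0
  | a :: rest => if PySem.Int.mod i a == 0 then 1 else countDivisibleInner i rest

def countDivisible (arr : List Int) (m : Int) : Int :=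
  (PySem.List.pyRange 1 (m + 1) 1).foldl (fun count i => count + countDivisibleInner i arr) 0

-- ===== PORT B =====
def countDivisible_alt (arr : List Int) (m : Int) : Int :=
  let marked : PySem.Set Int :=
    arr.foldl (fun s a =>
      let d := |a|
      if d ≠ 0 then PySem.Set.update s (PySem.List.pyRange d (m + 1) d) else s)
      PySem.Set.empty
  PySem.Set.len marked

-- ===== PRECONDITION & SPEC =====
-- Pre_ excludes exactly the inputs on which Python A raises ZeroDivisionError: arr contains a 0,
-- m ≥ 1, and no element of absolute value 1 precedes the first 0 (then i = 1 reaches the 0).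
def Pre_countDivisible (arr : List Int) (m : Int) : Prop :=
  (0 : Int) ∉ arr ∨ m < 1 ∨ (arr.takeWhile (fun a => a ≠ 0)).any (fun a => a == 1 || a == -1)
instance (arr : List Int) (m : Int) : Decidable (Pre_countDivisible arr m) := by unfold Pre_countDivisible; infer_instance
def pvWitness_countDivisible : List Int × Int := ([2, 3, 5], 20)

def Spec_countDivisible (arr : List Int) (m : Int) (out : Int) : Prop := out = countDivisible_alt arr m
instance (arr : List Int) (m : Int) (out : Int) : Decidable (Spec_countDivisible arr m out) := by unfold Spec_countDivisible; infer_instance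

-- ===== CLAIM (what is proved, stated in full; the proofs are below) =====
def Claim_equal_countDivisible : Prop := ∀ (arr : List Int) (m : Int), Dom_countDivisible arr m → Pre_countDivisible arr m → Spec_countDivisible arr m (countDivisible arr m)

-- ===== LEMMAS AND PROOFS =====

-- A's inner loop returns 1 iff some element divides i
theorem countDivisibleInner_eq (i : Int) (l : List Int) :
    countDivisibleInner i l = if l.any (fun a => decide (a ∣ i)) then 1 else 0 := by
  induction l with
  | nil => rfl
  | cons a rest ih =>
    simp only [countDivisibleInner, List.any_cons, ih]
    by_cases h : a ∣ i
    · simp [h, (PySem.Int.mod_eq_zero_iff_dvd i a).mpr h]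
    · have hm : ¬ PySem.Int.mod i a == 0 := by
        simp only [beq_iff_eq]
        exact fun hc => h ((PySem.Int.mod_eq_zero_iff_dvd i a).mp hc)
      simp [h, hm]

-- A counts the i in 1..m divisible by some element
theorem countDivisible_eq_countP (arr : List Int) (m : Int) :
    countDivisible arr m =
      ((PySem.List.pyRange 1 (m + 1) 1).countP (fun i => arr.any (fun a => decide (a ∣ i))) : Int) := by
  unfold countDivisible
  rw [PySem.List.foldl_add _ (fun i => countDivisibleInner i arr) 0]
  have : (PySem.List.pyRange 1 (m + 1) 1).map (fun i => countDivisibleInner i arr)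
       = (PySem.List.pyRange 1 (m + 1) 1).map
           (fun i => if (fun i => arr.any (fun a => decide (a ∣ i))) i then 1 else 0) := by
    apply List.map_congr_left
    intro i _
    exact countDivisibleInner_eq i arr
  rw [this, PySem.List.sum_map_ite_one_zero]
  simp

-- membership in the multiples range, for i ≥ 1 (a = 0 gives the empty range)
theorem mem_multiples_iff (a m i : Int) (hi1 : 1 ≤ i) :
    i ∈ PySem.List.pyRange |a| (m + 1) |a| ↔ (a ∣ i ∧ i < m + 1) := by
  by_cases ha : a = 0
  · subst ha
    simp only [abs_zero]
    constructor
    · intro h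
      have : PySem.List.pyRange (0 : Int) (m + 1) 0 = [] := rfl
      rw [this] at h; cases h
    · rintro ⟨hd, _⟩
      exact absurd (Int.zero_dvd.mp hd) (by omega)
  · have hpos : (0 : Int) < |a| := abs_pos.mpr ha
    rw [PySem.List.mem_pyRange_iff_of_pos hpos]
    constructor
    · rintro ⟨h1, h2, h3⟩
      have : |a| ∣ i := by have h4 := dvd_add h3 (dvd_refl |a|); simpa using h4
      exact ⟨(abs_dvd a i).mp this, h2⟩
    · rintro ⟨hd, hlt⟩
      have hd' : |a| ∣ i := (abs_dvd a i).mpr hd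
      refine ⟨Int.le_of_dvd (by omega) hd', hlt, ?_⟩
      exact dvd_sub hd' dvd_rfl

-- B's guarded fold step equals the unguarded one: for a = 0 the range is empty and update s [] = s
theorem fold_step_eq (m : Int) :
    (fun (s : PySem.Set Int) (a : Int) =>
      let d := |a|
      if d ≠ 0 then PySem.Set.update s (PySem.List.pyRange d (m + 1) d) else s)
    = (fun s a => PySem.Set.update s (PySem.List.pyRange |a| (m + 1) |a|)) := by
  funext s a
  by_cases ha : |a| = (0 : Int)
  · have ha0 : a = 0 := abs_eq_zero.mp ha
    subst ha0
    simp only [abs_zero]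
    rfl
  · simp [ha]

-- the marked set: nodup, and membership characterized
theorem marked_spec (arr : List Int) (m : Int) :
    let marked := arr.foldl (fun s a => PySem.Set.update s (PySem.List.pyRange |a| (m + 1) |a|)) PySem.Set.empty
    marked.Nodup ∧ ∀ i, i ∈ marked ↔ ∃ a ∈ arr, i ∈ PySem.List.pyRange |a| (m + 1) |a| := by
  intro marked
  have key : ∀ (l : List Int) (s : PySem.Set Int), s.Nodup →
      (l.foldl (fun s a => PySem.Set.update s (PySem.List.pyRange |a| (m + 1) |a|)) s).Nodup ∧
      ∀ i, i ∈ l.foldl (fun s a => PySem.Set.update s (PySem.List.pyRange |a| (m + 1) |a|)) s ↔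
        i ∈ s ∨ ∃ a ∈ l, i ∈ PySem.List.pyRange |a| (m + 1) |a| := by
    intro l
    induction l with
    | nil => intro s hs; exact ⟨hs, by simp⟩
    | cons a rest ih =>
      intro s hs
      have hs' := PySem.Set.nodup_update s (PySem.List.pyRange |a| (m + 1) |a|) hs
      obtain ⟨hn, hm⟩ := ih _ hs'
      refine ⟨hn, fun i => ?_⟩
      rw [List.foldl_cons, hm i, PySem.Set.mem_update]
      constructor
      · rintro ((h | h) | ⟨b, hb, hib⟩)
        · exact Or.inl h
        · exact Or.inr ⟨a, by simp, h⟩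
        · exact Or.inr ⟨b, by simp [hb], hib⟩
      · rintro (h | ⟨b, hb, hib⟩)
        · exact Or.inl (Or.inl h)
        · rcases List.mem_cons.mp hb with rfl | hb'
          · exact Or.inl (Or.inr hib)
          · exact Or.inr ⟨b, hb', hib⟩
  obtain ⟨hn, hm⟩ := key arr PySem.Set.empty (by simp [PySem.Set.empty])
  exact ⟨hn, fun i => by rw [hm i]; simp [PySem.Set.empty]⟩

-- the ports agree on every input (the Lean mod is total, so no case split on Pre_ is needed)
theorem ports_agree (arr : List Int) (m : Int) :
    countDivisible arr m = countDivisible_alt arr m := by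
  rw [countDivisible_eq_countP]
  unfold countDivisible_alt
  rw [fold_step_eq m]
  obtain ⟨hnodup, hmem⟩ := marked_spec arr m
  set marked := arr.foldl (fun s a => PySem.Set.update s (PySem.List.pyRange |a| (m + 1) |a|)) PySem.Set.empty with hmarked
  set p : Int → Bool := fun i => arr.any (fun a => decide (a ∣ i)) with hp
  have hperm : marked.Perm ((PySem.List.pyRange 1 (m + 1) 1).filter p) := by
    rw [List.perm_ext_iff_of_nodup hnodup ((PySem.List.nodup_pyRange_one 1 (m + 1)).filter p)]
    intro i
    rw [List.mem_filter, hmem i, PySem.List.mem_pyRange_one]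
    constructor
    · rintro ⟨a, ha, hia⟩
      have hi1 : 1 ≤ i := by
        by_cases h0 : a = 0
        · subst h0; simp only [abs_zero] at hia
          exact absurd hia (by intro h; have : PySem.List.pyRange (0:Int) (m+1) 0 = [] := rfl; rw [this] at h; cases h)
        · have hpos : (0 : Int) < |a| := abs_pos.mpr h0
          have := (PySem.List.mem_pyRange_iff_of_pos hpos i).mp hia
          omega
      obtain ⟨hd, hlt⟩ := (mem_multiples_iff a m i hi1).mp hia
      refine ⟨⟨hi1, hlt⟩, ?_⟩
      simp only [hp, List.any_eq_true]
      exact ⟨a, ha, by simp [hd]⟩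
    · rintro ⟨⟨hi1, hlt⟩, hpi⟩
      simp only [hp, List.any_eq_true, decide_eq_true_eq] at hpi
      obtain ⟨a, ha, hd⟩ := hpi
      exact ⟨a, ha, (mem_multiples_iff a m i hi1).mpr ⟨hd, hlt⟩⟩
  have hlen : marked.length = ((PySem.List.pyRange 1 (m + 1) 1).filter p).length := hperm.length_eq
  simp only [PySem.Set.len, hlen, ← List.countP_eq_length_filter]

-- ===== VERDICT (by name: the statements are the Claim_ definitions above) =====
theorem countDivisible_spec : Claim_equal_countDivisible := by
  intro arr m _ _
  exact ports_agree arr m
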